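-- pv_equiv track=rewrite | github.com/Harrumber/Vending-Machine-Assignment | assessed_lab_exercises.py | calculate_weekly_pay
-- ===== SOURCE A (Python) =====
-- def calculate_weekly_pay(hours_worked):
--     if not isinstance(hours_worked, int): #Ensures input parameter is an integer
--         return "Invalid input for number"
--     if hours_worked < 0: #Ensures input is greater than 0
--         return "Number should be positive"
--
--     money = 0 #Defines money counter at 0
--     for i in range(1, hours_worked + 1): #Loops through all the hours worked
--         if i <= 35: #For first 35, adds £12 to the total money
--             money += 12
--         #Could use else here but elif helps readability
--         elif i > 35: #For hours over 35, adds £18 to the total money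
--             money += 18
--     #Formatted string used to specify pounds (£)
--     return f"£{money}"
-- ===== SOURCE B (Python) =====
-- def calculate_weekly_pay(hours_worked):
--     if not isinstance(hours_worked, int):
--         return "Invalid input for number"
--     if hours_worked < 0:
--         return "Number should be positive"
--     money = 12 * min(hours_worked, 35) + 18 * max(0, hours_worked - 35)
--     return f"£{money}"
-- ===== Notes on version B (the rewrite author's own statement) =====
-- stated objective: faster
-- what changed: Replaces the per-hour accumulation loop with a closed-form expression: base rate times the capped regular hours plus overtime rate times the hours above the threshold.
import Mathlib
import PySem

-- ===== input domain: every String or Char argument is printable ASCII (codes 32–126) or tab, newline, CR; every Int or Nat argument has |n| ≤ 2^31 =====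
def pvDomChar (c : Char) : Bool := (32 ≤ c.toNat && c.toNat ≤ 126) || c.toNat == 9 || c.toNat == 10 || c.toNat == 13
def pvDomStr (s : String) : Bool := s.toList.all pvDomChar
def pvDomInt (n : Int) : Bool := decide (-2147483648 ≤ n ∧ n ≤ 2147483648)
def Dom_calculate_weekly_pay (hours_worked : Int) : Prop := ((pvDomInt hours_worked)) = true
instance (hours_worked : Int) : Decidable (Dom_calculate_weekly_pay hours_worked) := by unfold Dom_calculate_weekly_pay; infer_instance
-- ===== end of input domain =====

-- B replaces A's per-hour loop with the closed form 12*min(h,35)+18*max(0,h-35) (asymptotically faster).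


-- ===== PORT A =====
-- isinstance(hours_worked, int) is always true under the type convention, so that branch never fires.
def calculate_weekly_pay (hours_worked : Int) : String :=
  if hours_worked < 0 then "Number should be positive"
  else
    let money := (PySem.List.pyRange 1 (hours_worked + 1) 1).foldl
      (fun money i => if i ≤ 35 then money + 12 else if i > 35 then money + 18 else money) 0
    "£" ++ PySem.Int.toStr money

-- ===== PORT B =====
def calculate_weekly_pay_alt (hours_worked : Int) : String :=
  if hours_worked < 0 then "Number should be positive"
  else "£" ++ PySem.Int.toStr (12 * min hours_worked 35 + 18 * max 0 (hours_worked - 35))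

-- ===== PRECONDITION & SPEC =====
def Spec_calculate_weekly_pay (hours_worked : Int) (out : String) : Prop := out = calculate_weekly_pay_alt hours_worked
instance (hours_worked : Int) (out : String) : Decidable (Spec_calculate_weekly_pay hours_worked out) := by unfold Spec_calculate_weekly_pay; infer_instance

-- ===== CLAIM (what is proved, stated in full; the proofs are below) =====
def Claim_equal_calculate_weekly_pay : Prop := ∀ (hours_worked : Int), Dom_calculate_weekly_pay hours_worked → Spec_calculate_weekly_pay hours_worked (calculate_weekly_pay hours_worked)

-- ===== LEMMAS AND PROOFS =====
theorem pay_loop (n : Nat) :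
    (PySem.List.pyRange 1 ((n : Int) + 1) 1).foldl
      (fun money i => if i ≤ 35 then money + 12 else if i > 35 then money + 18 else money) 0
    = 12 * min (n : Int) 35 + 18 * max 0 ((n : Int) - 35) := by
  induction n with
  | zero => simp [PySem.List.pyRange_one_eq_nil]
  | succ m ih =>
    have h1 : (1 : Int) ≤ (m : Int) + 1 := by omega
    have : ((m : Int) + 1 + 1) = ((m : Int) + 1) + 1 := by ring
    rw [show ((m + 1 : Nat) : Int) + 1 = ((m : Int) + 1) + 1 by push_cast; ring,
        PySem.List.pyRange_one_succ_right h1, List.foldl_append, ih]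
    simp only [List.foldl]
    split_ifs with h2 h3 <;> push_cast <;> omega

-- ===== VERDICT (by name: the statement is the Claim_ definition above) =====
theorem calculate_weekly_pay_spec : Claim_equal_calculate_weekly_pay := by
  intro h _
  unfold Spec_calculate_weekly_pay calculate_weekly_pay calculate_weekly_pay_alt
  by_cases hneg : h < 0
  · simp [hneg]
  · have h0 : 0 ≤ h := by omega
    obtain ⟨n, rfl⟩ := Int.eq_ofNat_of_zero_le h0
    simp only [hneg, if_false]
    rw [pay_loop]
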